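-- pv_equiv track=rewrite | github.com/evoila/meho | meho_app/modules/connectors/gcp/helpers.py | parse_machine_type
-- ===== SOURCE A (Python) =====
-- def parse_machine_type(machine_type_url: str) -> dict[str, str]:
--     """
--     Parse machine type URL to extract details.
--
--     Args:
--         machine_type_url: URL like
--             "zones/us-central1-a/machineTypes/n1-standard-4"
--
--     Returns:
--         Dict with zone;and machine_type
--     """
--     if not machine_type_url:
--         return {"zone": "", "machine_type": ""}
--
--     parts = machine_type_url.split("/")
--     result = {"zone": "", "machine_type": ""}
--
--     for i, part in enumerate(parts):
--         if part == "zones" and i + 1 < len(parts):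
--             result["zone"] = parts[i + 1]
--         elif part == "machineTypes" and i + 1 < len(parts):
--             result["machine_type"] = parts[i + 1]
--
--     return result
-- ===== SOURCE B (Python) =====
-- def parse_machine_type(machine_type_url: str) -> dict[str, str]:
--     parts = machine_type_url.split("/")
--     nxt = {}
--     for cur, succ in zip(parts, parts[1:]):
--         nxt[cur] = succ
--     return {"zone": nxt.get("zones", ""), "machine_type": nxt.get("machineTypes", "")}
-- ===== Notes on version B (the rewrite author's own statement) =====
-- stated objective: alternative
-- what changed: Replaces the indexed enumerate loop with its two in-loop keyword branches and i+1 bound checks by an unconditional one-pass successor map built from adjacent pairs (zip(parts, parts[1:])), followed by two plain lookups.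
import Mathlib
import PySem

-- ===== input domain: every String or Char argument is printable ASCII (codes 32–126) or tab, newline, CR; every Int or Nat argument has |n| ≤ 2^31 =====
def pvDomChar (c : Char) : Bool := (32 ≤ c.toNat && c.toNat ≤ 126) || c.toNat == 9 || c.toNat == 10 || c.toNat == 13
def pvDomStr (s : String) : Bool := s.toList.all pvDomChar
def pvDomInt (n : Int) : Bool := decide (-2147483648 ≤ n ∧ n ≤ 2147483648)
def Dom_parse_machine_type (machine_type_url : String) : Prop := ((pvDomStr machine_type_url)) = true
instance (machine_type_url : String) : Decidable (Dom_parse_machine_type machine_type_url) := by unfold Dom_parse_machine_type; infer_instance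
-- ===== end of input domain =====

-- B replaces A's indexed loop (enumerate + i+1 bound checks + two keyword branches) by an
-- unconditional one-pass successor map over adjacent pairs, then two lookups; return value only.

-- ===== PORT A =====
-- the separator "/" is a nonempty literal, so Str.split? is always `some`; `.getD []` is exact here
def parse_machine_type (machine_type_url : String) : List (String × String) :=
  if machine_type_url = "" then [("zone", ""), ("machine_type", "")]
  else
    let parts := (PySem.Str.split? machine_type_url "/").getD []
    let result : PySem.Dict String String := PySem.Dict.ofList [("zone", ""), ("machine_type", "")]
    let result := (PySem.List.enumerate parts 0).foldl (fun r ip =>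
      if ip.2 = "zones" ∧ ip.1 + 1 < (parts.length : Int) then
        r.insert "zone" (PySem.List.pyGetD parts (ip.1 + 1) "")
      else if ip.2 = "machineTypes" ∧ ip.1 + 1 < (parts.length : Int) then
        r.insert "machine_type" (PySem.List.pyGetD parts (ip.1 + 1) "")
      else r) result
    result.items

-- ===== PORT B =====
def parse_machine_type_alt (machine_type_url : String) : List (String × String) :=
  let parts := (PySem.Str.split? machine_type_url "/").getD []
  let nxt : PySem.Dict String String :=
    (parts.zip (parts.drop 1)).foldl (fun d p => d.insert p.1 p.2) PySem.Dict.empty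
  [("zone", nxt.getD "zones" ""), ("machine_type", nxt.getD "machineTypes" "")]

-- ===== PRECONDITION & SPEC =====
def Spec_parse_machine_type (machine_type_url : String) (out : List (String × String)) : Prop := out = parse_machine_type_alt machine_type_url
instance (machine_type_url : String) (out : List (String × String)) : Decidable (Spec_parse_machine_type machine_type_url out) := by unfold Spec_parse_machine_type; infer_instance

-- ===== CLAIM (what is proved, stated in full; the proofs are below) =====
def Claim_equal_parse_machine_type : Prop := ∀ (machine_type_url : String), Dom_parse_machine_type machine_type_url → Spec_parse_machine_type machine_type_url (parse_machine_type machine_type_url)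

-- ===== LEMMAS AND PROOFS =====

-- A's loop body over indexed positions, and B's successor-map accumulation
def pvStepA (parts : List String) (r : PySem.Dict String String) (ip : Int × String) : PySem.Dict String String :=
  if ip.2 = "zones" ∧ ip.1 + 1 < (parts.length : Int) then
    r.insert "zone" (PySem.List.pyGetD parts (ip.1 + 1) "")
  else if ip.2 = "machineTypes" ∧ ip.1 + 1 < (parts.length : Int) then
    r.insert "machine_type" (PySem.List.pyGetD parts (ip.1 + 1) "")
  else r

def pvStepP (r : PySem.Dict String String) (p : String × String) : PySem.Dict String String :=
  if p.1 = "zones" then r.insert "zone" p.2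
  else if p.1 = "machineTypes" then r.insert "machine_type" p.2
  else r

def pvIns (d : PySem.Dict String String) (p : String × String) : PySem.Dict String String :=
  d.insert p.1 p.2

-- A's indexed fold over a suffix equals the fold over that suffix's adjacent pairs
lemma pvLoop_eq_pairs (parts : List String) :
    ∀ (rest : List String) (k : ℕ) (d : PySem.Dict String String),
      rest = parts.drop k →
      (PySem.List.enumerate rest (k : Int)).foldl (pvStepA parts) d
        = (rest.zip (rest.drop 1)).foldl pvStepP d := by
  intro rest
  induction rest with
  | nil => intro k d h; simp [PySem.List.enumerate]
  | cons p rs ih =>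
    intro k d h
    have hrs : rs = parts.drop (k + 1) := by
      have := congrArg (List.drop 1) h
      simpa [List.drop_drop, Nat.add_comm] using this
    have hlen : parts.length = k + 1 + rs.length := by
      have : (p :: rs).length = (parts.drop k).length := by rw [h]
      simp [List.length_drop] at this
      omega
    rw [PySem.List.enumerate_cons, List.foldl_cons,
      show ((k : Int) + 1) = ((k + 1 : ℕ) : Int) by push_cast; ring, ih (k + 1) _ hrs]
    cases rs with
    | nil =>
      have hfalse : ¬ ((k : Int) + 1 < (parts.length : Int)) := by
        simp [hlen]
      simp [pvStepA, hfalse]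
    | cons r rs' =>
      have hlt : (k : Int) + 1 < (parts.length : Int) := by
        simp only [List.length_cons] at hlen; omega
      have hget : PySem.List.pyGetD parts ((k : Int) + 1) "" = r := by
        have h1 : ((k : Int) + 1) = ((k + 1 : ℕ) : Int) := by push_cast; ring
        have hk1 : k + 1 < parts.length := by omega
        rw [h1, PySem.List.pyGetD_natCast]
        have : parts[k + 1]? = some r := by
          rw [← List.head?_drop, ← hrs]
          rfl
        simp [List.getD, this]
      have hA : pvStepA parts d ((k : Int), p) = pvStepP d (p, r) := by
        simp only [pvStepA, pvStepP, hget]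
        by_cases h1 : p = "zones" <;> by_cases h2 : p = "machineTypes" <;>
          simp [h1, h2, hlt]
      simp only [List.drop_one, List.tail_cons, List.zip_cons_cons, List.foldl_cons, hA]

-- the pairs fold on A's two-key dict is determined by B's successor map
lemma pvPairs_items (ps : List (String × String)) :
    (ps.foldl pvStepP (PySem.Dict.mk [("zone", ""), ("machine_type", "")])).items
      = [("zone", (ps.foldl pvIns PySem.Dict.empty).getD "zones" ""),
         ("machine_type", (ps.foldl pvIns PySem.Dict.empty).getD "machineTypes" "")] := by
  induction ps using List.reverseRecOn with
  | nil => simp [PySem.Dict.empty, PySem.Dict.getD, PySem.Dict.get?]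
  | append_singleton ps q ih =>
    rw [List.foldl_append, List.foldl_append]
    simp only [List.foldl_cons, List.foldl_nil]
    obtain ⟨c, v⟩ := q
    have hins : ∀ k, ((ps.foldl pvIns PySem.Dict.empty).insert c v).getD k ""
        = if k = c then v else (ps.foldl pvIns PySem.Dict.empty).getD k "" := by
      intro k; rw [PySem.Dict.getD_insert]
    generalize hg : ps.foldl pvStepP (PySem.Dict.mk [("zone", ""), ("machine_type", "")]) = X at ih ⊢
    obtain ⟨l⟩ := X
    have hl : l = [("zone", (ps.foldl pvIns PySem.Dict.empty).getD "zones" ""),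
         ("machine_type", (ps.foldl pvIns PySem.Dict.empty).getD "machineTypes" "")] := ih
    subst hl
    rw [show pvIns (List.foldl pvIns PySem.Dict.empty ps) (c, v)
          = (List.foldl pvIns PySem.Dict.empty ps).insert c v from rfl,
        hins "zones", hins "machineTypes"]
    by_cases h1 : c = "zones"
    · subst h1
      simp [pvStepP, PySem.Dict.insert, PySem.Dict.contains]
    · by_cases h2 : c = "machineTypes"
      · subst h2
        simp [pvStepP, PySem.Dict.insert, PySem.Dict.contains]
      · have h1' : ¬("zones" = c) := fun h => h1 h.symm
        have h2' : ¬("machineTypes" = c) := fun h => h2 h.symm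
        simp [pvStepP, h1, h2, h1', h2']

-- ===== VERDICT (by name: the statement is the Claim_ definition above) =====
theorem parse_machine_type_spec : Claim_equal_parse_machine_type := by
  intro u _
  unfold Spec_parse_machine_type parse_machine_type parse_machine_type_alt
  by_cases hu : u = ""
  · subst hu; decide
  · simp only [if_neg hu]
    set parts := (PySem.Str.split? u "/").getD [] with hp
    have key := pvLoop_eq_pairs parts parts 0 (PySem.Dict.ofList [("zone", ""), ("machine_type", "")]) rfl
    simp only [Nat.cast_zero] at key
    have hof : PySem.Dict.ofList [("zone", ""), ("machine_type", "")]
        = PySem.Dict.mk [("zone", ""), ("machine_type", "")] := by decide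
    change (List.foldl (pvStepA parts) (PySem.Dict.ofList [("zone", ""), ("machine_type", "")])
        (PySem.List.enumerate parts 0)).items
      = [("zone", (List.foldl pvIns PySem.Dict.empty (parts.zip (List.drop 1 parts))).getD "zones" ""),
         ("machine_type", (List.foldl pvIns PySem.Dict.empty (parts.zip (List.drop 1 parts))).getD "machineTypes" "")]
    rw [key, hof]
    exact pvPairs_items (parts.zip (List.drop 1 parts))
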